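-- pv_equiv track=rewrite | github.com/Naoya0523/Discord-BOT | custom3.py | get_role_score
-- ===== SOURCE A (Python) =====
-- def get_role_score(str_role, roles, priority_MMR):
--     if priority_MMR:
--         role_score = 0
--         role_bias = 0
--     else:
--         role_score = 800
--         role_bias = 250
--
--     for role in roles:
--         if role == str_role:
--             return role_score
--         elif role == 'fill':
--             return role_score
--         else:
--             role_score -= role_bias
--
--     return 0
-- ===== SOURCE B (Python) =====
-- def get_role_score(str_role, roles, priority_MMR):
--     base, bias = (0, 0) if priority_MMR else (800, 250)
--     hits = [roles.index(t) for t in (str_role, 'fill') if t in roles]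
--     return base - bias * min(hits) if hits else 0
-- ===== Notes on version B (the rewrite author's own statement) =====
-- stated objective: alternative
-- what changed: B has no scan over roles at all: it looks up the first occurrence of each of the two possible targets (str_role and 'fill') with roles.index, takes the minimum of those positions, and returns base - bias*min as one arithmetic expression, instead of A's element-by-element loop with a decrementing accumulator and early return.
import Mathlib
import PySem

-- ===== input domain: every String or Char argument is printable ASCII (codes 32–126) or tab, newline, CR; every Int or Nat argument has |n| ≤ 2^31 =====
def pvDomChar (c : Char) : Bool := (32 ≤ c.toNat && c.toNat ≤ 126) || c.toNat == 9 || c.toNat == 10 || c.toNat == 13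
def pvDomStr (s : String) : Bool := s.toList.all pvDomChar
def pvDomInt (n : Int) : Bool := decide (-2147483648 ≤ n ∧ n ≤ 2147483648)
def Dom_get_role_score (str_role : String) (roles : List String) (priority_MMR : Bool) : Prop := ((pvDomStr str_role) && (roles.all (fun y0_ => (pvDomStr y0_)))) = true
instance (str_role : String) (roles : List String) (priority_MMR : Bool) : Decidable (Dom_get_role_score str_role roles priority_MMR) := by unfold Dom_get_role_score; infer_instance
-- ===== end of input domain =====

-- B replaces A's scanning loop with a decrementing accumulator by two direct
-- roles.index lookups (str_role and 'fill'), a minimum, and one arithmetic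
-- expression (objective: alternative decomposition, same cost).

-- ===== PORT A =====
-- A's for-loop with the mutating role_score accumulator, as structural recursion.
def get_role_score_loop (str_role : String) (role_bias : Int) : List String → Int → Int
  | [], _ => 0
  | role :: rest, role_score =>
      if role == str_role then role_score
      else if role == "fill" then role_score
      else get_role_score_loop str_role role_bias rest (role_score - role_bias)

def get_role_score (str_role : String) (roles : List String) (priority_MMR : Bool) : Int :=
  let role_score : Int := if priority_MMR then 0 else 800
  let role_bias : Int := if priority_MMR then 0 else 250
  get_role_score_loop str_role role_bias roles role_score

-- ===== PORT B =====
-- hits = [roles.index(t) for t in (str_role, 'fill') if t in roles]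
def get_role_score_alt (str_role : String) (roles : List String) (priority_MMR : Bool) : Int :=
  let base : Int := if priority_MMR then 0 else 800
  let bias : Int := if priority_MMR then 0 else 250
  let hits : List Nat :=
    ([str_role, "fill"]).filterMap
      (fun t => if roles.contains t then PySem.List.index? roles t else none)
  match hits.min? with
  | none => 0
  | some m => base - bias * (m : Int)

-- ===== PRECONDITION & SPEC =====
def Spec_get_role_score (str_role : String) (roles : List String) (priority_MMR : Bool) (out : Int) : Prop := out = get_role_score_alt str_role roles priority_MMR
instance (str_role : String) (roles : List String) (priority_MMR : Bool) (out : Int) : Decidable (Spec_get_role_score str_role roles priority_MMR out) := by unfold Spec_get_role_score; infer_instance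

-- ===== CLAIM =====
def Claim_equal_get_role_score : Prop := ∀ (str_role : String) (roles : List String) (priority_MMR : Bool), Dom_get_role_score str_role roles priority_MMR → Spec_get_role_score str_role roles priority_MMR (get_role_score str_role roles priority_MMR)

-- ===== LEMMAS AND PROOFS =====
-- A's loop computes base - bias * i for the first index i matching str_role or 'fill'.
theorem get_role_score_loop_eq (str_role : String) (bias : Int) (roles : List String) (base : Int) :
    get_role_score_loop str_role bias roles base =
      match roles.findIdx? (fun r => r == str_role || r == "fill") with
      | none => 0
      | some i => base - bias * (i : Int) := by
  induction roles generalizing base with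
  | nil => simp [get_role_score_loop]
  | cons r rest ih =>
      simp only [get_role_score_loop, List.findIdx?_cons]
      by_cases h1 : r == str_role
      · simp [h1]
      · by_cases h2 : r == "fill"
        · simp [h1, h2]
        · simp only [h1, h2, Bool.false_or, Bool.false_eq_true]
          rw [ih]
          cases hf : rest.findIdx? (fun r => r == str_role || r == "fill") with
          | none => simp
          | some i => simp; ring

-- The first index matching either target is the minimum of the two first occurrences.
theorem findIdx?_eq_min_index (s : String) (roles : List String) :
    roles.findIdx? (fun r => r == s || r == "fill") =
      match PySem.List.index? roles s, PySem.List.index? roles "fill" with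
      | none, none => none
      | some a, none => some a
      | none, some b => some b
      | some a, some b => some (min a b) := by
  induction roles with
  | nil => simp [PySem.List.index?]
  | cons r rest ih =>
      by_cases h1 : r = s
      · subst h1
        rw [PySem.List.index?_cons_self]
        by_cases h2 : r = "fill"
        · subst h2
          rw [PySem.List.index?_cons_self]
          simp [List.findIdx?_cons]
        · rw [PySem.List.index?_cons_of_ne rest (by simpa using h2 : r ≠ "fill")]
          simp only [List.findIdx?_cons, beq_self_eq_true, Bool.true_or, if_true]
          cases PySem.List.index? rest "fill" <;> simp
      · rw [PySem.List.index?_cons_of_ne rest (by simpa using h1 : r ≠ s)]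
        by_cases h2 : r = "fill"
        · subst h2
          rw [PySem.List.index?_cons_self]
          simp only [List.findIdx?_cons, beq_self_eq_true, Bool.or_true, if_true]
          cases PySem.List.index? rest s <;> simp
        · rw [PySem.List.index?_cons_of_ne rest (by simpa using h2 : r ≠ "fill")]
          simp only [List.findIdx?_cons]
          have hb1 : (r == s) = false := by simpa using h1
          have hb2 : (r == "fill") = false := by simpa using h2
          simp only [hb1, hb2, Bool.false_or, Bool.false_eq_true, if_false]
          rw [ih]
          cases ha : PySem.List.index? rest s <;> cases hb : PySem.List.index? rest "fill" <;>
            simp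

-- B's hits list, analysed by the two membership tests.
theorem hits_min_eq (s : String) (roles : List String) :
    (([s, "fill"]).filterMap
        (fun t => if roles.contains t then PySem.List.index? roles t else none)).min? =
      match PySem.List.index? roles s, PySem.List.index? roles "fill" with
      | none, none => none
      | some a, none => some a
      | none, some b => some b
      | some a, some b => some (min a b) := by
  have hs := PySem.List.index?_isSome_iff (xs := roles) (v := s)
  have hf := PySem.List.index?_isSome_iff (xs := roles) (v := "fill")
  cases ha : PySem.List.index? roles s <;> cases hb : PySem.List.index? roles "fill" <;>
    · rw [ha] at hs; rw [hb] at hf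
      simp only [List.filterMap, List.contains_iff_mem]
      simp only [Option.isSome] at hs hf
      first
        | simp [hs.symm.mpr rfl, hf.symm.mpr rfl, ha, hb, List.min?]
        | simp_all [List.min?]

-- ===== VERDICT =====
theorem get_role_score_spec : Claim_equal_get_role_score := by
  intro s roles p _
  unfold Spec_get_role_score get_role_score get_role_score_alt
  rw [get_role_score_loop_eq]
  simp only [hits_min_eq, findIdx?_eq_min_index]
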